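-- pv_equiv track=rewrite | github.com/marufmurtuza/code-practice | Array Series/Array Series.py | arraySeries
-- ===== SOURCE A (Python) =====
-- def arraySeries(n):
--     array=[0]*(n*n)
--     index=1
--     while(index<=n):
--         value=1
--         value_index=(n*index)-1 #2,5,8
--         while(value<=index): #divide by group of n
--             array[value_index]=value
--             value+=1
--             value_index-=1
--         index+=1
--     return array
-- ===== SOURCE B (Python) =====
-- def arraySeries(n):
--     return [v
--             for i in range(1, n + 1)
--             for v in [0] * (n - i) + list(range(i, 0, -1))]
-- ===== Notes on version B (the rewrite author's own statement) =====
-- stated objective: simpler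
-- what changed: Instead of preallocating an n*n zero buffer and writing each descending run backward into it with counter-maintained indices, B builds each row directly as its padding plus a reversed range and flattens the rows with a nested comprehension, maintaining no buffer or running index.
-- intended difference: For negative n, A returns a list of n*n zeros (an artifact of preallocating a squared-length buffer that its loops never touch), while B returns the empty list, the intended result for a non-positive row count. — e.g. on arraySeries(-1): A returns [0], B returns []
import Mathlib
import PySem

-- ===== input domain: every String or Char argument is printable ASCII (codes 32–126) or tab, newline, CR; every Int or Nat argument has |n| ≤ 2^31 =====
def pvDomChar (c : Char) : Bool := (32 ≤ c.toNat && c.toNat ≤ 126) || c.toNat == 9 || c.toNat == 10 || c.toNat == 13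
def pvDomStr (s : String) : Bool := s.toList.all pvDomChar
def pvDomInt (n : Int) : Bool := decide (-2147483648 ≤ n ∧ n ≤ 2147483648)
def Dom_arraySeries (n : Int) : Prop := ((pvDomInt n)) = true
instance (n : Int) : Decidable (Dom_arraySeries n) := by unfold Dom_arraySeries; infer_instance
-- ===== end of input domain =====

-- B builds each row as padding plus a reversed range and flattens, instead of writing backward
-- into a preallocated buffer (objective: simpler); for n < 0 the two differ as stated at D_ below.

-- ===== PORT A =====
-- inner 'while value <= index' loop: writes value at value_index, then value += 1, value_index -= 1
def arraySeriesInner (array : List Int) (index value value_index : Int) : List Int :=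
  if value ≤ index then
    arraySeriesInner (PySem.List.pySetD array value_index value) index (value + 1) (value_index - 1)
  else array
termination_by (index + 1 - value).toNat
decreasing_by omega

-- outer 'while index <= n' loop
def arraySeriesOuter (n : Int) (array : List Int) (index : Int) : List Int :=
  if index ≤ n then
    arraySeriesOuter n (arraySeriesInner array index 1 (n * index - 1)) (index + 1)
  else array
termination_by (n + 1 - index).toNat
decreasing_by omega

def arraySeries (n : Int) : List Int :=
  arraySeriesOuter n (List.replicate (n * n).toNat 0) 1

-- ===== PORT B =====
-- [v for i in range(1, n+1) for v in [0]*(n-i) + list(range(i, 0, -1))]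
def arraySeries_alt (n : Int) : List Int :=
  (PySem.List.pyRange 1 (n + 1) 1).flatMap
    (fun i => List.replicate (n - i).toNat 0 ++ PySem.List.pyRange i 0 (-1))

-- ===== PRECONDITION & SPEC =====
-- For negative n, A returns a list of n*n zeros (an artifact of preallocating a squared-length
-- buffer its loops never touch), while B returns the empty list, the intended result for a
-- non-positive row count.
def D_arraySeries (n : Int) : Prop := n < 0
instance (n : Int) : Decidable (D_arraySeries n) := by unfold D_arraySeries; infer_instance

def Spec_arraySeries (n : Int) (out : List Int) : Prop := ¬ D_arraySeries n → out = arraySeries_alt n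
instance (n : Int) (out : List Int) : Decidable (Spec_arraySeries n out) := by unfold Spec_arraySeries; infer_instance

def pvDiffWitness_arraySeries : Int := (-1)
def pvDiffWitnessOut_arraySeries : (List Int) × (List Int) := ([0], [])

-- ===== CLAIM (what is proved, stated in full; the proofs are below) =====
def Claim_unchanged_arraySeries : Prop := ∀ (n : Int), Dom_arraySeries n → Spec_arraySeries n (arraySeries n)
def Claim_changed_arraySeries : Prop := Dom_arraySeries (pvDiffWitness_arraySeries) ∧ D_arraySeries (pvDiffWitness_arraySeries) ∧ arraySeries (pvDiffWitness_arraySeries) = pvDiffWitnessOut_arraySeries.1 ∧ arraySeries_alt (pvDiffWitness_arraySeries) = pvDiffWitnessOut_arraySeries.2 ∧ pvDiffWitnessOut_arraySeries.1 ≠ pvDiffWitnessOut_arraySeries.2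
def Claim_exact_arraySeries : Prop := ∀ (n : Int), Dom_arraySeries n → D_arraySeries n → arraySeries n ≠ arraySeries_alt n

-- ===== LEMMAS AND PROOFS =====

lemma length_inner (index : Int) : ∀ (fuel : Nat) (value value_index : Int) (array : List Int),
    fuel = (index + 1 - value).toNat →
    (arraySeriesInner array index value value_index).length = array.length := by
  intro fuel
  induction fuel with
  | zero =>
    intro v vi array hf
    rw [arraySeriesInner, if_neg (by omega)]
  | succ f ih =>
    intro v vi array hf
    rw [arraySeriesInner]
    split
    · rw [ih (v + 1) (vi - 1) _ (by omega), PySem.List.length_pySetD]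
    · rfl

lemma inner_spec (i : Int) : ∀ (fuel : Nat) (v vi : Int) (array : List Int),
    fuel = (i + 1 - v).toNat →
    v ≤ i + 1 → 0 ≤ vi - (i - v) → vi < (array.length : Int) →
    ∀ m : Int, 0 ≤ m →
    PySem.List.pyGetD (arraySeriesInner array i v vi) m 0 =
      if vi - (i - v) ≤ m ∧ m ≤ vi then v + vi - m else PySem.List.pyGetD array m 0 := by
  intro fuel
  induction fuel with
  | zero =>
    intro v vi array hf h2 hlo hhi m hm
    rw [arraySeriesInner, if_neg (by omega), if_neg (by omega)]
  | succ f ih =>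
    intro v vi array hf h2 hlo hhi m hm
    rw [arraySeriesInner]
    split
    case isFalse h => rw [if_neg (by omega)]
    case isTrue h =>
      rw [ih (v + 1) (vi - 1) _ (by omega) (by omega) (by omega)
          (by rw [PySem.List.length_pySetD]; omega) m hm]
      have hset : PySem.List.pyGetD (PySem.List.pySetD array vi v) m 0 =
          if m.toNat = vi.toNat then v else PySem.List.pyGetD array m 0 := by
        rw [show vi = ((vi.toNat : Nat) : Int) from by omega,
            show m = ((m.toNat : Nat) : Int) from by omega]
        exact PySem.List.pyGetD_pySetD_natCast array vi.toNat m.toNat v 0 (by omega)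
      rw [hset]
      split_ifs <;> omega

lemma inner_as_slice (n i : Int) (h1 : 1 ≤ i) (h2 : i ≤ n) (array : List Int)
    (hlen : (array.length : Int) = n * n) :
    arraySeriesInner array i 1 (n * i - 1) =
      array.take (n * i - i).toNat ++ PySem.List.pyRange i 0 (-1) ++ array.drop (n * i).toNat := by
  have hP0 : 0 ≤ n * i - i := by nlinarith
  have hPQ : n * i ≤ n * n := by nlinarith
  generalize hP : n * i = P at *
  generalize hQ : n * n = Q at *
  have hlenL : (arraySeriesInner array i 1 (P - 1)).length = array.length :=
    length_inner i (i + 1 - 1).toNat _ _ _ rfl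
  apply List.ext_getElem
  · rw [hlenL]
    simp [PySem.List.length_pyRange_neg_one]
    omega
  · intro j hj hj'
    have hjlen : j < array.length := by omega
    have hspec := inner_spec i (i + 1 - 1).toNat 1 (P - 1) array rfl (by omega) (by omega)
      (by omega) (j : Int) (by omega)
    rw [PySem.List.pyGetD_natCast, PySem.List.pyGetD_natCast,
        List.getD_eq_getElem _ _ hj, List.getD_eq_getElem _ _ hjlen] at hspec
    rw [hspec]
    simp only [PySem.List.pyRange_neg_one]
    simp only [List.getElem_append, List.length_append, List.length_take, List.length_map,
      List.length_range, List.getElem_take, List.getElem_map, List.getElem_range,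
      List.getElem_drop]
    split_ifs with hc hd he
    · exfalso; omega
    · omega
    · exfalso; omega
    · rfl
    · exfalso; omega
    · congr 1
      omega

-- one row of B
lemma row_length (n i : Int) (h1 : 1 ≤ i) (h2 : i ≤ n) :
    ((List.replicate (n - i).toNat (0 : Int) ++ PySem.List.pyRange i 0 (-1)).length : Int) = n := by
  rw [List.length_append, List.length_replicate, PySem.List.length_pyRange_neg_one]
  push_cast
  omega

-- the outer loop, started on 'done rows + untouched zeros', produces 'done rows + remaining rows'
lemma outer_flat (n : Int) : ∀ (fuel : Nat) (i : Int) (done : List Int),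
    fuel = (n + 1 - i).toNat → 1 ≤ i → i ≤ n + 1 → (done.length : Int) = n * (i - 1) →
    arraySeriesOuter n (done ++ List.replicate (n * (n + 1 - i)).toNat 0) i =
      done ++ (PySem.List.pyRange i (n + 1) 1).flatMap
        (fun j => List.replicate (n - j).toNat 0 ++ PySem.List.pyRange j 0 (-1)) := by
  intro fuel
  induction fuel with
  | zero =>
    intro i done hf h1 h2 hlen
    rw [arraySeriesOuter, if_neg (by omega), PySem.List.pyRange_one_eq_nil (by omega),
        show (n * (n + 1 - i)).toNat = 0 by rw [show n + 1 - i = 0 by omega, mul_zero]; rfl]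
    simp
  | succ f ih =>
    intro i done hf h1 h2 hlen
    rw [arraySeriesOuter]
    split
    case isFalse h =>
      rw [PySem.List.pyRange_one_eq_nil (by omega),
          show (n * (n + 1 - i)).toNat = 0 by rw [show n + 1 - i = 0 by omega, mul_zero]; rfl]
      simp
    case isTrue h =>
      have hn1 : 1 ≤ n := by omega
      set Z := (n * (n + 1 - i)).toNat with hZ
      have hZval : (Z : Int) = n * (n + 1 - i) :=
        Int.toNat_of_nonneg (mul_nonneg (by omega) (by omega))
      have e1 : n * i - i = n * (i - 1) + (n - i) := by ring
      have e2 : n * (n + 1 - i) = n + n * (n + 1 - (i + 1)) := by ring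
      have e3 : (0 : Int) ≤ n * (i - 1) := mul_nonneg (by omega) (by omega)
      have e4 : (0 : Int) ≤ n * (n + 1 - (i + 1)) := mul_nonneg (by omega) (by omega)
      have e5 : n * i = n * (i - 1) + n := by ring
      have e6 : n * (i - 1) + n * (n + 1 - i) = n * n := by ring
      have harrlen : (((done ++ List.replicate Z (0 : Int))).length : Int) = n * n := by
        rw [List.length_append, List.length_replicate]
        push_cast
        omega
      rw [inner_as_slice n i h1 h _ harrlen]
      -- take (n*i - i) = done ++ (n - i) zeros ; drop (n*i) = n*(n - i) zeros
      have htake : (done ++ List.replicate Z (0 : Int)).take (n * i - i).toNat =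
          done ++ List.replicate (n - i).toNat 0 := by
        rw [List.take_append, List.take_of_length_le (by omega), List.take_replicate]
        congr 2
        omega
      have hdrop : (done ++ List.replicate Z (0 : Int)).drop (n * i).toNat =
          List.replicate (n * (n + 1 - (i + 1))).toNat 0 := by
        rw [List.drop_append, List.drop_eq_nil_of_le (by omega), List.drop_replicate,
            List.nil_append]
        congr 1
        omega
      rw [htake, hdrop]
      have hrow := row_length n i h1 h
      have hstep := ih (i + 1)
        (done ++ (List.replicate (n - i).toNat 0 ++ PySem.List.pyRange i 0 (-1)))
        (by omega) (by omega) (by omega)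
        (by rw [List.length_append, Nat.cast_add, hlen, hrow]; ring)
      rw [show done ++ List.replicate (n - i).toNat (0:Int) ++ PySem.List.pyRange i 0 (-1) ++
            List.replicate (n * (n + 1 - (i + 1))).toNat 0 =
          (done ++ (List.replicate (n - i).toNat 0 ++ PySem.List.pyRange i 0 (-1))) ++
            List.replicate (n * (n + 1 - (i + 1))).toNat 0 by simp, hstep,
          PySem.List.pyRange_one_cons (show i < n + 1 by omega), List.flatMap_cons]
      simp

theorem arraySeries_eq_alt (n : Int) (hn : 0 ≤ n) : arraySeries n = arraySeries_alt n := by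
  unfold arraySeries arraySeries_alt
  have h := outer_flat n (n + 1 - 1).toNat 1 [] rfl (le_refl 1) (by omega) (by simp)
  simpa [show n + 1 - 1 = n from by omega] using h

-- ===== VERDICT (by name: the statements are the Claim_ definitions above) =====
theorem arraySeries_spec : Claim_unchanged_arraySeries := by
  intro n _ hD
  unfold D_arraySeries at hD
  exact arraySeries_eq_alt n (by omega)

theorem arraySeries_changed : Claim_changed_arraySeries := by
  unfold Claim_changed_arraySeries
  refine ⟨by decide, by decide, ?_, by decide, by decide⟩
  unfold pvDiffWitness_arraySeries pvDiffWitnessOut_arraySeries arraySeries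
  rw [arraySeriesOuter, if_neg (by decide)]
  decide

theorem arraySeries_tight : Claim_exact_arraySeries := by
  intro n _ hD
  unfold D_arraySeries at hD
  have hA : arraySeries n = List.replicate (n * n).toNat 0 := by
    unfold arraySeries
    rw [arraySeriesOuter, if_neg (by omega)]
  have hB : arraySeries_alt n = [] := by
    unfold arraySeries_alt
    rw [PySem.List.pyRange_one_eq_nil (by omega), List.flatMap_nil]
  rw [hA, hB]
  intro hcontra
  have hz : (n * n).toNat = 0 := by simpa using congrArg List.length hcontra
  have h1 : (1 : Int) ≤ n * n := by nlinarith
  have h2 : ((n * n).toNat : Int) = n * n := Int.toNat_of_nonneg (by omega)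
  omega
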